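-- pv_equiv track=rewrite | github.com/d14405021-coder/2026-python | weeks/week-05/solutions/1114405021/question_10057.py | solve_midsummer_dream
-- ===== SOURCE A (Python) =====
-- def solve_midsummer_dream(numbers):
--     """
--     計算並回傳題目的三個要求數字
--     :param numbers: 整數陣列
--     :return: (最小的A, 陣列中符合條件的數字個數, 可能的A的總數)
--     """
--     n = len(numbers)
--     if n == 0:
--         return None
--
--     # 步驟 1：先將陣列由小到大排序
--     numbers.sort()
--
--     # 步驟 2：找中位數
--     if n % 2 == 1:
--         # 奇數長度，中位數只有一個
--         mid_index = n // 2
--         mid1 = numbers[mid_index]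
--         mid2 = numbers[mid_index]
--     else:
--         # 偶數長度，中位數有兩個
--         # 因為索引從 0 開始，所以左邊的中位數是 (n//2)-1，右邊是 n//2
--         mid_index1 = (n // 2) - 1
--         mid_index2 = n // 2
--         mid1 = numbers[mid_index1]
--         mid2 = numbers[mid_index2]
--
--     # 第一個答案：最小的 A，就是左邊的中位數 mid1
--     ans_min_a = mid1
--
--     # 第二個答案：陣列中，有多少個數字的值剛好落在 [mid1, mid2] 的範圍內
--     # 這些數字就是原始輸入中能當作「能產生最小值的 A 們」的數字
--     ans_count = sum(1 for x in numbers if mid1 <= x <= mid2)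
--
--     # 第三個答案：有多少種不同的整數 A 可以產生最小值
--     # 也就是區間 [mid1, mid2] 包含幾個整數
--     ans_possibilities = mid2 - mid1 + 1
--
--     return (ans_min_a, ans_count, ans_possibilities)
-- ===== SOURCE B (Python) =====
-- def solve_midsummer_dream(numbers):
--     """B: quickselect (3-way partition, middle pivot) for the two median elements
--     instead of a full sort, then one linear count.
--     Note: A sorts `numbers` in place; B does not mutate it (return value identical)."""
--     n = len(numbers)
--     if n == 0:
--         return None
--     mid2 = _quickselect(numbers, n // 2)
--     if n % 2 == 1:
--         mid1 = mid2
--     else: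
--         mid1 = _quickselect(numbers, n // 2 - 1)
--     count = sum(mid1 <= x <= mid2 for x in numbers)
--     return (mid1, count, mid2 - mid1 + 1)
--
--
-- def _quickselect(xs, k):
--     # value at index k of sorted(xs); iterative 3-way partition quickselect
--     while True:
--         p = xs[len(xs) // 2]
--         lt = [x for x in xs if x < p]
--         eqn = sum(x == p for x in xs)
--         if k < len(lt):
--             xs = lt
--         elif k < len(lt) + eqn:
--             return p
--         else:
--             k -= len(lt) + eqn
--             xs = [x for x in xs if x > p]
-- ===== Notes on version B (the rewrite author's own statement) =====
-- stated objective: alternative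
-- what changed: B finds the two median elements by iterative 3-way-partition quickselect (expected-linear selection) and counts values in [mid1,mid2] in one linear pass over the unsorted input, instead of A's full sort; B also does not mutate the input list (A sorts it in place; the return value is identical).
import Mathlib
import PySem

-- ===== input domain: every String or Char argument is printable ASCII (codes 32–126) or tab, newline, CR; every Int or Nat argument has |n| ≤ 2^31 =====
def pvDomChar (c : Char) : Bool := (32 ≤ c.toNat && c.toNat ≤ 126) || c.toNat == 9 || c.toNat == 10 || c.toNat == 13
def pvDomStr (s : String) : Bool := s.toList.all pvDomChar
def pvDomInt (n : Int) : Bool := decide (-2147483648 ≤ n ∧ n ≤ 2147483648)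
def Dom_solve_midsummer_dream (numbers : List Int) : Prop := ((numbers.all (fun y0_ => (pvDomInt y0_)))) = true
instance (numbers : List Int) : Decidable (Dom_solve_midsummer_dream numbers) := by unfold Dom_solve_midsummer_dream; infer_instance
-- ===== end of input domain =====

-- B finds the median element(s) by 3-way-partition quickselect instead of A's full
-- sort, plus one linear count over the unsorted input; A sorts `numbers` in place,
-- B does not mutate it — the equivalence proved here is about the return value only.


-- ===== PORT A =====
-- Literal port of A: sort, read the one/two middle elements, count members of
-- [mid1, mid2] by a 0/1 generator sum over the (now sorted) list, span = mid2-mid1+1.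
def solve_midsummer_dream (numbers : List Int) : Option (List Int) :=
  let n : Int := (numbers.length : Int)
  if n = 0 then none
  else
    let s := PySem.List.sorted numbers (fun x => x) false
    let mids :=
      if PySem.Int.mod n 2 = 1 then
        (PySem.List.pyGetD s (PySem.Int.floordiv n 2) 0,
         PySem.List.pyGetD s (PySem.Int.floordiv n 2) 0)
      else
        (PySem.List.pyGetD s (PySem.Int.floordiv n 2 - 1) 0,
         PySem.List.pyGetD s (PySem.Int.floordiv n 2) 0)
    let ansCount : Int := (s.map (fun x => if mids.1 ≤ x ∧ x ≤ mids.2 then (1 : Int) else 0)).sum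
    some [mids.1, ansCount, mids.2 - mids.1 + 1]

-- ===== PORT B =====
-- Source B's `_quickselect`: value at index k of sorted(xs) by 3-way partition around the
-- middle element (the Python while-loop is this tail recursion).
def pvQuickselect (xs : List Int) (k : Nat) : Int :=
  if h : xs.length = 0 then 0
  else
    let p := xs.getD (xs.length / 2) 0
    let lt := xs.filter (fun x => x < p)
    let eqn := xs.countP (fun x => x == p)
    if k < lt.length then pvQuickselect lt k
    else if k < lt.length + eqn then p
    else pvQuickselect (xs.filter (fun x => p < x)) (k - (lt.length + eqn))
termination_by xs.length
decreasing_by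
  all_goals
  · have hlt : xs.length / 2 < xs.length := Nat.div_lt_self (Nat.pos_of_ne_zero h) one_lt_two
    have hp : xs.getD (xs.length / 2) 0 ∈ xs := by
      rw [List.getD_eq_getElem xs 0 hlt]; exact xs.getElem_mem hlt
    simp only [List.length_unattach]
    apply lt_of_lt_of_le _ (List.length_attach (l := xs)).le
    exact List.length_filter_lt_length_iff_exists.mpr ⟨⟨_, hp⟩, List.mem_attach _ _, by simp⟩

def solve_midsummer_dream_alt (numbers : List Int) : Option (List Int) :=
  let n := numbers.length
  if n = 0 then none
  else
    let mid2 := pvQuickselect numbers (n / 2)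
    let mid1 := if n % 2 = 1 then mid2 else pvQuickselect numbers (n / 2 - 1)
    let count : Int := (numbers.countP (fun x => decide (mid1 ≤ x ∧ x ≤ mid2)) : Int)
    some [mid1, count, mid2 - mid1 + 1]

-- ===== PRECONDITION & SPEC =====
def Spec_solve_midsummer_dream (numbers : List Int) (out : Option (List Int)) : Prop := out = solve_midsummer_dream_alt numbers
instance (numbers : List Int) (out : Option (List Int)) : Decidable (Spec_solve_midsummer_dream numbers out) := by unfold Spec_solve_midsummer_dream; infer_instance

-- ===== CLAIM (what is proved, stated in full; the proofs are below) =====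
def Claim_equal_solve_midsummer_dream : Prop := ∀ (numbers : List Int), Dom_solve_midsummer_dream numbers → Spec_solve_midsummer_dream numbers (solve_midsummer_dream numbers)

-- ===== LEMMAS AND PROOFS =====

-- count of a in a filtered list, as an if
lemma pvCountFilter (l : List Int) (q : Int → Bool) (a : Int) :
    List.count a (l.filter q) = if q a then List.count a l else 0 := by
  by_cases h : q a = true
  · rw [List.count_filter h]; simp [h]
  · simp only [h, if_false]
    exact List.count_eq_zero.mpr (fun hm => h (List.of_mem_filter hm))

-- the 3-way partition of xs around p is a permutation of xs
lemma pvPartPerm (xs : List Int) (p : Int) :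
    (xs.filter (fun x => x < p) ++ (xs.filter (fun x => x == p) ++ xs.filter (fun x => p < x))).Perm xs := by
  rw [List.perm_iff_count]
  intro a
  simp only [List.count_append, pvCountFilter]
  split_ifs <;> simp_all <;> omega

-- sorted(xs) decomposes as sorted(<p) ++ (==p) ++ sorted(>p)
lemma pvSortedPart (xs : List Int) (p : Int) :
    PySem.List.sorted xs (fun x => x) false =
      PySem.List.sorted (xs.filter (fun x => x < p)) (fun x => x) false ++
      (xs.filter (fun x => x == p) ++
       PySem.List.sorted (xs.filter (fun x => p < x)) (fun x => x) false) := by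
  apply PySem.List.sorted_id_eq_of_perm_of_pairwise
  · exact ((PySem.List.sorted_perm _ _ _).append
      ((List.Perm.refl _).append (PySem.List.sorted_perm _ _ _))).trans (pvPartPerm xs p)
  · rw [List.pairwise_append]
    refine ⟨PySem.List.sorted_pairwise _ _, ?_, ?_⟩
    · rw [List.pairwise_append]
      refine ⟨List.pairwise_of_forall_mem_list ?_, PySem.List.sorted_pairwise _ _, ?_⟩
      · intro a ha b hb
        simp [List.mem_filter] at ha hb; omega
      · intro a ha b hb
        rw [PySem.List.mem_sorted] at hb
        simp [List.mem_filter] at ha hb; omega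
    · intro a ha b hb
      rw [PySem.List.mem_sorted] at ha
      simp [List.mem_filter] at ha
      rcases List.mem_append.mp hb with hb | hb
      · simp [List.mem_filter] at hb; omega
      · rw [PySem.List.mem_sorted] at hb
        simp [List.mem_filter] at hb; omega

-- quickselect computes the k-th element of the sorted list
lemma pvQuickselect_correct (xs0 : List Int) (k0 : Nat) (hk0 : k0 < xs0.length) :
    pvQuickselect xs0 k0 = (PySem.List.sorted xs0 (fun x => x) false).getD k0 0 := by
  suffices H : ∀ n (xs : List Int) (k : Nat), xs.length = n → k < xs.length →
      pvQuickselect xs k = (PySem.List.sorted xs (fun x => x) false).getD k 0 by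
    exact H xs0.length xs0 k0 rfl hk0
  intro n
  induction n using Nat.strong_induction_on with
  | _ n ih =>
    intro xs k hlen hk
    have hne : ¬ xs.length = 0 := by omega
    have hdiv : xs.length / 2 < xs.length := Nat.div_lt_self (Nat.pos_of_ne_zero hne) one_lt_two
    rw [pvQuickselect, dif_neg hne]
    dsimp only
    set p := xs.getD (xs.length / 2) 0 with hpdef
    have hpmem : p ∈ xs := by
      rw [hpdef, List.getD_eq_getElem xs 0 hdiv]; exact xs.getElem_mem hdiv
    set ltl := xs.filter (fun x => x < p) with hltdef
    set eql := xs.filter (fun x => x == p) with heqdef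
    set gtl := xs.filter (fun x => p < x) with hgtdef
    have heqn : xs.countP (fun x => x == p) = eql.length := by
      rw [heqdef, List.countP_eq_length_filter]
    have hlensum : ltl.length + (eql.length + gtl.length) = xs.length := by
      have := (pvPartPerm xs p).length_eq
      simpa using this
    have hltlt : ltl.length < xs.length := by
      rw [hltdef]
      exact List.length_filter_lt_length_iff_exists.mpr ⟨p, hpmem, by simp⟩
    have hgtlt : gtl.length < xs.length := by
      rw [hgtdef]
      exact List.length_filter_lt_length_iff_exists.mpr ⟨p, hpmem, by simp⟩
    rw [pvSortedPart xs p, ← hltdef, ← heqdef, ← hgtdef]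
    by_cases h1 : k < ltl.length
    · rw [if_pos h1,
        List.getD_append _ _ _ _ (by rw [PySem.List.length_sorted]; exact h1)]
      exact ih ltl.length (by omega) ltl k rfl h1
    · rw [if_neg h1, heqn,
        List.getD_append_right _ _ _ _ (by rw [PySem.List.length_sorted]; omega),
        PySem.List.length_sorted]
      by_cases h2 : k < ltl.length + eql.length
      · rw [if_pos h2, List.getD_append _ _ _ _ (by omega)]
        have hklt : k - ltl.length < eql.length := by omega
        rw [List.getD_eq_getElem _ 0 hklt]
        have hmem : eql[k - ltl.length] ∈ eql := List.getElem_mem hklt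
        have hall : ∀ a ∈ eql, a = p := by
          intro a ha; rw [heqdef] at ha
          exact eq_of_beq (List.of_mem_filter (p := fun x => x == p) ha)
        exact (hall _ hmem).symm
      · rw [if_neg h2, List.getD_append_right _ _ _ _ (by omega),
          show k - ltl.length - eql.length = k - (ltl.length + eql.length) from by omega]
        exact ih gtl.length (by omega) gtl _ rfl (by omega)

-- ===== VERDICT (by name: the statement is the Claim_ definition above) =====
theorem solve_midsummer_dream_spec : Claim_equal_solve_midsummer_dream := by
  intro numbers _dom
  unfold Spec_solve_midsummer_dream solve_midsummer_dream solve_midsummer_dream_alt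
  by_cases h0 : numbers.length = 0
  · simp [h0]
  · have hpos : 0 < numbers.length := Nat.pos_of_ne_zero h0
    have hc : ¬ ((numbers.length : Int) = 0) := by exact_mod_cast h0
    rw [if_neg hc, if_neg h0]
    dsimp only
    set L := numbers.length with hL
    set s := PySem.List.sorted numbers (fun x => x) false with hs
    have hmod : PySem.Int.mod (L : Int) 2 = ((L % 2 : Nat) : Int) := by
      exact_mod_cast PySem.Int.mod_natCast L 2
    have hfd : PySem.Int.floordiv (L : Int) 2 = ((L / 2 : Nat) : Int) := by
      exact_mod_cast PySem.Int.floordiv_natCast L 2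
    have hq2 : L / 2 < L := Nat.div_lt_self hpos one_lt_two
    have hm2 : PySem.List.pyGetD s ((L / 2 : Nat) : Int) 0 = pvQuickselect numbers (L / 2) := by
      rw [PySem.List.pyGetD_natCast]
      exact (pvQuickselect_correct numbers (L / 2) hq2).symm
    have hcount : ∀ m1 m2 : Int,
        (s.map (fun x => if m1 ≤ x ∧ x ≤ m2 then (1 : Int) else 0)).sum =
        ((numbers.countP (fun x => decide (m1 ≤ x ∧ x ≤ m2)) : Nat) : Int) := by
      intro m1 m2
      have h1 := PySem.List.sum_map_ite_one_zero (fun x => decide (m1 ≤ x ∧ x ≤ m2)) s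
      have h2 := (PySem.List.sorted_perm numbers (fun x => x) false).countP_eq
        (fun x => decide (m1 ≤ x ∧ x ≤ m2))
      rw [hs, h2] at h1
      simpa using h1
    rw [hmod, hfd]
    by_cases hpar : L % 2 = 1
    · rw [if_pos (by exact_mod_cast hpar), if_pos hpar]
      simp only [hm2, hcount]
    · rw [if_neg (by exact_mod_cast hpar), if_neg hpar]
      have h1le : 1 ≤ L / 2 := by omega
      have hm1 : PySem.List.pyGetD s (((L / 2 : Nat) : Int) - 1) 0 = pvQuickselect numbers (L / 2 - 1) := by
        rw [show ((L / 2 : Nat) : Int) - 1 = ((L / 2 - 1 : Nat) : Int) from by omega,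
          PySem.List.pyGetD_natCast]
        exact (pvQuickselect_correct numbers (L / 2 - 1) (by omega)).symm
      simp only [hm1, hm2, hcount]
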